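-- pv_equiv track=rewrite | github.com/satishskid/pediassist | pediassist/core/communication_engine.py | _simplify_for_school_age
-- ===== SOURCE A (Python) =====
-- def _simplify_for_school_age(text: str) -> str:
--     """Adapt language for school-age children (6-12 years)"""
--     # Add explanations but keep it engaging
--     explanations = {
--         "immune system": "your immune system (your body's defense team)",
--         "antibiotic": "antibiotic (medicine that kills bacteria)",
--         "inflammation": "inflammation (when part of your body gets red and swollen)"
--     }
--
--     for complex_term, explanation in explanations.items():
--         text = text.replace(complex_term, explanation)
--
--     return text
-- ===== SOURCE B (Python) =====
-- def _simplify_for_school_age(text: str) -> str: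
--     """Adapt language for school-age children (6-12 years)"""
--     pairs = [
--         ("immune system", "your immune system (your body's defense team)"),
--         ("antibiotic", "antibiotic (medicine that kills bacteria)"),
--         ("inflammation", "inflammation (when part of your body gets red and swollen)"),
--     ]
--     out = []
--     i = 0
--     n = len(text)
--     while i < n:
--         for term, expl in pairs:
--             if text.startswith(term, i):
--                 out.append(expl)
--                 i += len(term)
--                 break
--         else:
--             out.append(text[i])
--             i += 1
--     return "".join(out)
-- ===== Notes on version B (the rewrite author's own statement) =====
-- stated objective: alternative
-- what changed: Replaces three sequential full-text str.replace passes by a single left-to-right scan that substitutes all three terms simultaneously (correct because no term or replacement can create or span another term's occurrence).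
import Mathlib
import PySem

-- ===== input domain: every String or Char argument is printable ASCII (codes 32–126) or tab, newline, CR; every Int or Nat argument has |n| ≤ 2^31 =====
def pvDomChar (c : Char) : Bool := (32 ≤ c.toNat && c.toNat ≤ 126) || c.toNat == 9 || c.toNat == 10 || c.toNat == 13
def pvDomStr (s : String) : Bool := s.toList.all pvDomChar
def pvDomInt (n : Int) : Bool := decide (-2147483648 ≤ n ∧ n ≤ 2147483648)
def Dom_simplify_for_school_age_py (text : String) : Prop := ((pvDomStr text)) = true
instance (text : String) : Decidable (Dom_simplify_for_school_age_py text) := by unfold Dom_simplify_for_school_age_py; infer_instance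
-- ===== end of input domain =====

-- B replaces A's three sequential full-text str.replace passes by one left-to-right scan
-- substituting all three terms simultaneously (objective: alternative single-pass algorithm).


-- ===== PORT A =====
-- the dict literal `explanations`
def pvExplanations : PySem.Dict String String :=
  (((PySem.Dict.empty).insert "immune system" "your immune system (your body's defense team)").insert
      "antibiotic" "antibiotic (medicine that kills bacteria)").insert
    "inflammation" "inflammation (when part of your body gets red and swollen)"

-- for complex_term, explanation in explanations.items(): text = text.replace(complex_term, explanation)
def simplify_for_school_age_py (text : String) : String :=
  pvExplanations.items.foldl (fun t p => PySem.Str.replace t p.1 p.2) text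

-- ===== PORT B =====
-- the `pairs` list of Source B, as lists of chars
def pvK1 : List Char := "immune system".toList
def pvR1 : List Char := "your immune system (your body's defense team)".toList
def pvK2 : List Char := "antibiotic".toList
def pvR2 : List Char := "antibiotic (medicine that kills bacteria)".toList
def pvK3 : List Char := "inflammation".toList
def pvR3 : List Char := "inflammation (when part of your body gets red and swollen)".toList

-- Source B's while-loop: at each position try the three terms in order (the inner for/break),
-- emit the explanation and skip the term on a match, else copy one character.
-- (c :: t).drop pvKi.length is written t.drop (pvKi.length - 1) with the literal number.
def pvScan : List Char → List Char
  | [] => []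
  | c :: t =>
    if pvK1.isPrefixOf (c :: t) then pvR1 ++ pvScan (t.drop 12)
    else if pvK2.isPrefixOf (c :: t) then pvR2 ++ pvScan (t.drop 9)
    else if pvK3.isPrefixOf (c :: t) then pvR3 ++ pvScan (t.drop 11)
    else c :: pvScan t
termination_by s => s.length
decreasing_by all_goals simp only [List.length_drop, List.length_cons]; omega

def simplify_for_school_age_py_alt (text : String) : String :=
  String.ofList (pvScan text.toList)

-- ===== PRECONDITION & SPEC =====
def Spec_simplify_for_school_age_py (text : String) (out : String) : Prop := out = simplify_for_school_age_py_alt text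
instance (text : String) (out : String) : Decidable (Spec_simplify_for_school_age_py text out) := by unfold Spec_simplify_for_school_age_py; infer_instance

-- ===== CLAIM (what is proved, stated in full; the proofs are below) =====
def Claim_equal_simplify_for_school_age_py : Prop := ∀ (text : String), Dom_simplify_for_school_age_py text → Spec_simplify_for_school_age_py text (simplify_for_school_age_py text)

-- ===== LEMMAS AND PROOFS =====

-- Recursive specification of Python's single-key str.replace (PySem.Chars.replace).
def pvRepR (k r : List Char) : List Char → List Char
  | [] => []
  | c :: t =>
    if k.isPrefixOf (c :: t) then r ++ pvRepR k r (t.drop (k.length - 1))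
    else c :: pvRepR k r t
termination_by s => s.length
decreasing_by all_goals simp only [List.length_drop, List.length_cons]; omega

theorem pvRepR_nil (k r : List Char) : pvRepR k r [] = [] := by rw [pvRepR.eq_def]

theorem pvRepR_cons (k r : List Char) (c : Char) (t : List Char) :
    pvRepR k r (c :: t) =
      if k.isPrefixOf (c :: t) then r ++ pvRepR k r (t.drop (k.length - 1))
      else c :: pvRepR k r t := by
  rw [pvRepR.eq_def]

theorem pvScan_nil : pvScan [] = [] := by rw [pvScan.eq_def]

theorem pvScan_cons (c : Char) (t : List Char) :
    pvScan (c :: t) =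
      if pvK1.isPrefixOf (c :: t) then pvR1 ++ pvScan (t.drop 12)
      else if pvK2.isPrefixOf (c :: t) then pvR2 ++ pvScan (t.drop 9)
      else if pvK3.isPrefixOf (c :: t) then pvR3 ++ pvScan (t.drop 11)
      else c :: pvScan t := by
  rw [pvScan.eq_def]

theorem pvReplaceGo_eq (k r : List Char) (hk : k ≠ []) (fuel : Nat) :
    ∀ (l acc : List Char), l.length ≤ fuel →
      PySem.Chars.replace.go k r fuel l acc = acc.reverse ++ pvRepR k r l := by
  induction fuel with
  | zero =>
    intro l acc h
    have : l = [] := by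
      cases l with
      | nil => rfl
      | cons a t => simp at h
    subst this
    simp [PySem.Chars.replace.go, pvRepR_nil]
  | succ n ih =>
    intro l acc h
    cases l with
    | nil => simp [PySem.Chars.replace.go, pvRepR_nil]
    | cons c t =>
      by_cases hp : k.isPrefixOf (c :: t)
      · rw [PySem.Chars.replace.go]
        simp only [hp, if_pos]
        have hkpos : 0 < k.length := by
          cases k with
          | nil => exact absurd rfl hk
          | cons d k' => simp
        have hdrop : List.drop k.length (c :: t) = t.drop (k.length - 1) := by
          cases k with
          | nil => simp at hkpos
          | cons d k' => simp
        rw [hdrop]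
        have hlen : (t.drop (k.length - 1)).length ≤ n := by
          simp only [List.length_drop]
          simp at h
          omega
        rw [ih _ _ hlen]
        rw [pvRepR_cons]
        simp [hp]
      · rw [PySem.Chars.replace.go]
        have hp' : k.isPrefixOf (c :: t) = false := Bool.eq_false_iff.mpr hp
        rw [hp']
        have hlen : t.length ≤ n := by simp at h; omega
        simp only [Bool.false_eq_true, if_neg, not_false_eq_true]
        rw [ih _ _ hlen]
        rw [pvRepR_cons]
        simp [hp']

theorem pvReplace_eq (s k r : List Char) (hk : k ≠ []) :
    PySem.Chars.replace s k r = pvRepR k r s := by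
  rw [PySem.Chars.replace]
  have : k.isEmpty = false := by
    cases k with
    | nil => exact absurd rfl hk
    | cons a t => rfl
  rw [this]
  simp only [Bool.false_eq_true, if_neg, not_false_eq_true]
  simpa using pvReplaceGo_eq k r hk s.length s [] (le_refl _)

-- pvRepR at a key occurrence consumes exactly the key.
theorem pvRepR_key (k r b : List Char) (hk : k ≠ []) :
    pvRepR k r (k ++ b) = r ++ pvRepR k r b := by
  cases hk0 : k with
  | nil => exact absurd hk0 hk
  | cons d k' =>
    rw [List.cons_append, pvRepR_cons]
    have hp : (d :: k').isPrefixOf (d :: (k' ++ b)) := by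
      simp [List.isPrefixOf_iff_prefix]
    simp only [hp, if_pos]
    have : (k' ++ b).drop ((d :: k').length - 1) = b := by
      simp
    rw [this]

-- "no occurrence of k starts inside a": for every start position in a, comparing
-- the next k.length characters of a already yields a mismatch with k.
def pvNoSpanB (a k : List Char) : Bool :=
  (List.range a.length).all (fun i => !(((a.drop i).take k.length).isPrefixOf k))

theorem pvNoSpan_head (a k : List Char) (h : pvNoSpanB a k = true) (ha : a ≠ [])
    (b : List Char) : ¬ k.isPrefixOf (a ++ b) := by
  intro hp
  have h0 := (List.all_eq_true.mp h) 0 (by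
    simp only [List.mem_range]
    cases a with
    | nil => exact absurd rfl ha
    | cons c t => simp)
  simp only [List.drop_zero, Bool.not_eq_eq_eq_not, Bool.not_true] at h0
  rw [List.isPrefixOf_iff_prefix] at hp
  have h1 : a.take k.length <+: a ++ b :=
    (List.take_prefix _ _).trans (List.prefix_append _ _)
  have h2 : a.take k.length <+: k :=
    List.prefix_of_prefix_length_le h1 hp (by simp)
  rw [← List.isPrefixOf_iff_prefix] at h2
  rw [h0] at h2
  exact Bool.false_ne_true h2

theorem pvNoSpan_tail (c : Char) (a k : List Char) (h : pvNoSpanB (c :: a) k = true) :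
    pvNoSpanB a k = true := by
  rw [pvNoSpanB, List.all_eq_true] at h ⊢
  intro i hi
  have := h (i + 1) (by simp [List.mem_range] at hi ⊢; omega)
  simpa using this

-- rep distributes over a block a in which no k-occurrence can start.
theorem pvRepR_append (k r : List Char) (_hk : k ≠ []) :
    ∀ a b : List Char, pvNoSpanB a k = true →
      pvRepR k r (a ++ b) = a ++ pvRepR k r b := by
  intro a
  induction a with
  | nil => intro b _; simp
  | cons c a' ih =>
    intro b h
    have hnp : k.isPrefixOf ((c :: a') ++ b) = false :=
      Bool.eq_false_iff.mpr (pvNoSpan_head _ _ h (by simp) b)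
    rw [List.cons_append, pvRepR_cons]
    rw [show (c :: (a' ++ b)) = (c :: a') ++ b from rfl, hnp]
    simp only [Bool.false_eq_true, if_neg, not_false_eq_true]
    rw [List.cons_append]
    rw [ih b (pvNoSpan_tail c a' k h)]

-- "g is fresh for r": no tail of g is a prefix of r.
def pvFreshB (g r : List Char) : Bool :=
  (List.range g.length).all (fun j => !((g.drop j).isPrefixOf r))

-- replacing k by r never creates a new occurrence of g at the front:
-- any tail of g that is a prefix of the output is a prefix of the input.
theorem pvRepR_keeps (k r g : List Char) (_hg : g ≠ []) (hlen : g.length ≤ r.length)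
    (hf : pvFreshB g r = true) :
    ∀ s j, j ≤ g.length → (g.drop j) <+: pvRepR k r s → (g.drop j) <+: s := by
  intro s
  induction hs : s.length using Nat.strong_induction_on generalizing s with
  | _ n ih =>
    subst hs
    intro j hj hpre
    by_cases hje : j = g.length
    · simp [hje]
    have hjl : j < g.length := lt_of_le_of_ne hj hje
    have hfree : ¬ (g.drop j <+: r) := by
      have hb := (List.all_eq_true.mp hf) j (by simp only [List.mem_range]; omega)
      simp only [Bool.not_eq_eq_eq_not, Bool.not_true] at hb
      intro hc
      rw [← List.isPrefixOf_iff_prefix, hb] at hc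
      exact Bool.false_ne_true hc
    cases s with
    | nil =>
      rw [pvRepR_nil] at hpre
      exact hpre
    | cons c t =>
      rw [pvRepR_cons] at hpre
      by_cases hp : k.isPrefixOf (c :: t)
      · simp only [hp, if_pos] at hpre
        exfalso
        apply hfree
        have h2 : r <+: r ++ pvRepR k r (t.drop (k.length - 1)) := List.prefix_append _ _
        exact List.prefix_of_prefix_length_le hpre h2 (by simp; omega)
      · have hp' : k.isPrefixOf (c :: t) = false := Bool.eq_false_iff.mpr hp
        rw [hp'] at hpre
        simp only [Bool.false_eq_true, if_neg, not_false_eq_true] at hpre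
        have hgd : g.drop j = g[j] :: g.drop (j + 1) := (List.getElem_cons_drop hjl).symm
        rw [hgd] at hpre
        rcases (List.cons_prefix_cons.mp hpre) with ⟨hc, htail⟩
        have := ih t.length (by simp) t rfl (j + 1) (by omega) htail
        rw [hgd]
        exact List.cons_prefix_cons.mpr ⟨hc, this⟩

theorem pvRepR_notpre (k r g : List Char) (hg : g ≠ []) (hlen : g.length ≤ r.length)
    (hf : pvFreshB g r = true) (s : List Char) (h : ¬ g <+: s) :
    ¬ g <+: pvRepR k r s := by
  intro hc
  exact h (by simpa using pvRepR_keeps k r g hg hlen hf s 0 (by omega) (by simpa using hc))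

-- abbreviations for the three passes
def pvRep1 : List Char → List Char := pvRepR pvK1 pvR1
def pvRep2 : List Char → List Char := pvRepR pvK2 pvR2
def pvRep3 : List Char → List Char := pvRepR pvK3 pvR3

theorem pvRepR_cons_neg (k r : List Char) (c : Char) (t : List Char)
    (h : ¬ k.isPrefixOf (c :: t)) : pvRepR k r (c :: t) = c :: pvRepR k r t := by
  have h' : k.isPrefixOf (c :: t) = false := Bool.eq_false_iff.mpr h
  rw [pvRepR_cons, h']
  simp

-- the main simulation: the three sequential passes equal the one simultaneous scan
theorem pvMain : ∀ s : List Char, pvRep3 (pvRep2 (pvRep1 s)) = pvScan s := by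
  intro s
  induction hs : s.length using Nat.strong_induction_on generalizing s with
  | _ n ih =>
    subst hs
    cases s with
    | nil => simp [pvRep1, pvRep2, pvRep3, pvRepR_nil, pvScan_nil]
    | cons c t =>
      by_cases h1 : pvK1.isPrefixOf (c :: t)
      · rcases List.isPrefixOf_iff_prefix.mp h1 with ⟨b, hb⟩
        have hbt : t.drop 12 = b := by
          have h13 : pvK1.length = 13 := by decide
          have hd := List.drop_left (l₁ := pvK1) (l₂ := b)
          rw [h13, hb] at hd
          simpa using hd
        have hblen : b.length < (c :: t).length := by
          rw [← hb]
          simp only [List.length_append,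
            show pvK1.length = 13 from by decide]
          omega
        rw [← hb, pvRep1, pvRepR_key pvK1 pvR1 b (by decide),
            pvRep2, pvRepR_append pvK2 pvR2 (by decide) pvR1 _ (by decide),
            pvRep3, pvRepR_append pvK3 pvR3 (by decide) pvR1 _ (by decide),
            hb, pvScan_cons]
        simp only [h1, if_pos]
        rw [hbt]
        exact congrArg (pvR1 ++ ·) (ih b.length hblen b rfl)
      · by_cases h2 : pvK2.isPrefixOf (c :: t)
        · rcases List.isPrefixOf_iff_prefix.mp h2 with ⟨b, hb⟩
          have hbt : t.drop 9 = b := by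
            have h10 : pvK2.length = 10 := by decide
            have hd := List.drop_left (l₁ := pvK2) (l₂ := b)
            rw [h10, hb] at hd
            simpa using hd
          have hblen : b.length < (c :: t).length := by
            rw [← hb]
            simp only [List.length_append,
              show pvK2.length = 10 from by decide]
            omega
          rw [← hb, pvRep1, pvRepR_append pvK1 pvR1 (by decide) pvK2 _ (by decide),
              pvRep2, pvRepR_key pvK2 pvR2 _ (by decide),
              pvRep3, pvRepR_append pvK3 pvR3 (by decide) pvR2 _ (by decide),
              hb, pvScan_cons]
          simp only [h1, h2, if_pos, Bool.false_eq_true, if_neg, not_false_eq_true]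
          rw [hbt]
          exact congrArg (pvR2 ++ ·) (ih b.length hblen b rfl)
        · by_cases h3 : pvK3.isPrefixOf (c :: t)
          · rcases List.isPrefixOf_iff_prefix.mp h3 with ⟨b, hb⟩
            have hbt : t.drop 11 = b := by
              have h12 : pvK3.length = 12 := by decide
              have hd := List.drop_left (l₁ := pvK3) (l₂ := b)
              rw [h12, hb] at hd
              simpa using hd
            have hblen : b.length < (c :: t).length := by
              rw [← hb]
              simp only [List.length_append,
                show pvK3.length = 12 from by decide]
              omega
            rw [← hb, pvRep1, pvRepR_append pvK1 pvR1 (by decide) pvK3 _ (by decide),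
                pvRep2, pvRepR_append pvK2 pvR2 (by decide) pvK3 _ (by decide),
                pvRep3, pvRepR_key pvK3 pvR3 _ (by decide),
                hb, pvScan_cons]
            simp only [h1, h2, h3, if_pos, Bool.false_eq_true, if_neg, not_false_eq_true]
            rw [hbt]
            exact congrArg (pvR3 ++ ·) (ih b.length hblen b rfl)
          · -- no term matches at this position
            have e1 : pvRep1 (c :: t) = c :: pvRep1 t := pvRepR_cons_neg _ _ _ _ h1
            have n2 : ¬ pvK2 <+: pvRep1 (c :: t) :=
              pvRepR_notpre pvK1 pvR1 pvK2 (by decide) (by decide) (by decide) _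
                (by simpa [List.isPrefixOf_iff_prefix] using h2)
            have n3a : ¬ pvK3 <+: pvRep1 (c :: t) :=
              pvRepR_notpre pvK1 pvR1 pvK3 (by decide) (by decide) (by decide) _
                (by simpa [List.isPrefixOf_iff_prefix] using h3)
            have n3 : ¬ pvK3 <+: pvRep2 (pvRep1 (c :: t)) :=
              pvRepR_notpre pvK2 pvR2 pvK3 (by decide) (by decide) (by decide) _ n3a
            have e2 : pvRep2 (pvRep1 (c :: t)) = c :: pvRep2 (pvRep1 t) := by
              rw [e1]
              exact pvRepR_cons_neg _ _ _ _ (by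
                rw [← e1]
                simpa [List.isPrefixOf_iff_prefix] using n2)
            have e3 : pvRep3 (pvRep2 (pvRep1 (c :: t))) = c :: pvRep3 (pvRep2 (pvRep1 t)) := by
              rw [e2]
              exact pvRepR_cons_neg _ _ _ _ (by
                rw [← e2]
                simpa [List.isPrefixOf_iff_prefix] using n3)
            rw [e3, pvScan_cons]
            simp only [h1, h2, h3, Bool.false_eq_true, if_neg, not_false_eq_true]
            rw [ih t.length (by simp) t rfl]

theorem pvItems : pvExplanations.items =
    [("immune system", "your immune system (your body's defense team)"),
     ("antibiotic", "antibiotic (medicine that kills bacteria)"),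
     ("inflammation", "inflammation (when part of your body gets red and swollen)")] := by
  decide

theorem pvA_eq (text : String) :
    (simplify_for_school_age_py text).toList = pvRep3 (pvRep2 (pvRep1 text.toList)) := by
  rw [simplify_for_school_age_py, pvItems]
  simp only [List.foldl]
  rw [PySem.Str.toList_replace, PySem.Str.toList_replace, PySem.Str.toList_replace]
  rw [pvReplace_eq _ _ _ (by simp), pvReplace_eq _ _ _ (by simp), pvReplace_eq _ _ _ (by simp)]
  rfl

-- ===== VERDICT (by name: the statement is the Claim_ definition above) =====
theorem simplify_for_school_age_py_spec : Claim_equal_simplify_for_school_age_py := by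
  intro text _
  unfold Spec_simplify_for_school_age_py simplify_for_school_age_py_alt
  have h : (simplify_for_school_age_py text).toList = pvScan text.toList := by
    rw [pvA_eq, pvMain]
  rw [← h, String.ofList_toList]
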